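-- pv_equiv track=rewrite | github.com/WalterSilva5/estudos | uast/AED/AED 2018.2/ordenação/somar.py | algoritmoA
-- ===== SOURCE A (Python) =====
-- def algoritmoA(n, execuções=0):
--     soma = 0
--     i = 1
--     while i <= n:
--         execuções += 1
--         soma += i
--         execuções += 1
--         i += 1
--         execuções += 1
--
--     return execuções
-- ===== SOURCE B (Python) =====
-- def algoritmoA(n, execuções=0):
--     # Closed form: the loop body runs once per i in 1..n and adds 3 to execuções each time.
--     return execuções + 3 * max(n, 0)
-- ===== Notes on version B (the rewrite author's own statement) =====
-- stated objective: faster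
-- what changed: Replaced the counting while-loop by the closed form execuções + 3*max(n,0).
import Mathlib
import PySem

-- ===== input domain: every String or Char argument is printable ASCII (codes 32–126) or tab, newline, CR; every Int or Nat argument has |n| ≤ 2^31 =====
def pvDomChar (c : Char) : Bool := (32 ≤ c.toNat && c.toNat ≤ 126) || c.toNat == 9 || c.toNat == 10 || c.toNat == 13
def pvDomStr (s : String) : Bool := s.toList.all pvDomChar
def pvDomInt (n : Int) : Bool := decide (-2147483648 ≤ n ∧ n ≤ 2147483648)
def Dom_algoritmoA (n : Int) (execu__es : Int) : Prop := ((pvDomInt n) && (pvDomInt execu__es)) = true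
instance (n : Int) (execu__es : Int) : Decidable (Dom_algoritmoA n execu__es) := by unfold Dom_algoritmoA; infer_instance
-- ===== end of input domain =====

-- B replaces A's step-counting while-loop by the closed form execuções + 3*max(n,0): faster (O(1) vs O(n)).

-- ===== PORT A =====
-- literal port of the while loop: state (soma, i, execuções), runs while i ≤ n
def algoritmoALoop (n : Int) (soma i execu__es : Int) : Int :=
  if h : i ≤ n then
    algoritmoALoop n (soma + i) (i + 1) (execu__es + 3)
  else
    execu__es
termination_by (n + 1 - i).toNat
decreasing_by
  have : n + 1 - (i + 1) < n + 1 - i := by omega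
  omega

def algoritmoA (n : Int) (execu__es : Int) : Int :=
  algoritmoALoop n 0 1 execu__es

-- ===== PORT B =====
def algoritmoA_alt (n : Int) (execu__es : Int) : Int :=
  execu__es + 3 * max n 0

-- ===== PRECONDITION & SPEC =====
def Spec_algoritmoA (n : Int) (execu__es : Int) (out : Int) : Prop := out = algoritmoA_alt n execu__es
instance (n : Int) (execu__es : Int) (out : Int) : Decidable (Spec_algoritmoA n execu__es out) := by unfold Spec_algoritmoA; infer_instance

-- ===== CLAIM (what is proved, stated in full; the proofs are below) =====
def Claim_equal_algoritmoA : Prop := ∀ (n : Int) (execu__es : Int), Dom_algoritmoA n execu__es → Spec_algoritmoA n execu__es (algoritmoA n execu__es)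

-- ===== LEMMAS AND PROOFS =====

-- loop invariant: the loop returns execuções plus 3 per remaining iteration
theorem algoritmoALoop_eq (n soma i execu__es : Int) :
    algoritmoALoop n soma i execu__es = execu__es + 3 * max (n + 1 - i) 0 := by
  rw [algoritmoALoop]
  split_ifs with h
  · rw [algoritmoALoop_eq]
    omega
  · omega
termination_by (n + 1 - i).toNat
decreasing_by omega

-- ===== VERDICT (by name: the statement is the Claim_ definition above) =====
theorem algoritmoA_spec : Claim_equal_algoritmoA := by
  intro n e _
  unfold Spec_algoritmoA algoritmoA algoritmoA_alt
  rw [algoritmoALoop_eq]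
  omega
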